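-- pv_equiv track=rewrite | github.com/LazyerIJ/Algorithm | Problem/Codility/lesson2/1.py | solution
-- ===== SOURCE A (Python) =====
-- def solution(A):
--     # correctness : 100 / performance : 50 / score : 77
--     '''
--     flag = [0] * 1000000
--     for num in A:
--         flag[num] += 1
--         flag[num] %= 2
--     return flag.index(1)
--     '''
--     if len(A) == 1:
--         return A[0]
--
--     A = sorted(A)
--     for i in range(0, len(A), 2):
--         if i+1 == len(A):
--             return A[-1]
--         if A[i] != A[i+1]:
--             return A[i]
--     return A[-1]
-- ===== SOURCE B (Python) =====
-- def solution(A):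
--     # Count occurrences once, then scan the distinct values in increasing
--     # order keeping the cumulative count: the first value at which the
--     # cumulative count is odd is the answer; otherwise it is max(A).
--     cnt = {}
--     for x in A:
--         cnt[x] = cnt.get(x, 0) + 1
--     acc = 0
--     for v in sorted(cnt):
--         acc += cnt[v]
--         if acc % 2 == 1:
--             return v
--     return max(A)
-- ===== Notes on version B (the rewrite author's own statement) =====
-- stated objective: alternative
-- what changed: Instead of sorting the whole list and scanning adjacent pairs, B builds a value->count dictionary in one pass and scans only the sorted distinct values, returning the first value at which the cumulative count becomes odd (max(A) if none); Pre_ excludes only the empty list, on which both raise.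
import Mathlib
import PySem

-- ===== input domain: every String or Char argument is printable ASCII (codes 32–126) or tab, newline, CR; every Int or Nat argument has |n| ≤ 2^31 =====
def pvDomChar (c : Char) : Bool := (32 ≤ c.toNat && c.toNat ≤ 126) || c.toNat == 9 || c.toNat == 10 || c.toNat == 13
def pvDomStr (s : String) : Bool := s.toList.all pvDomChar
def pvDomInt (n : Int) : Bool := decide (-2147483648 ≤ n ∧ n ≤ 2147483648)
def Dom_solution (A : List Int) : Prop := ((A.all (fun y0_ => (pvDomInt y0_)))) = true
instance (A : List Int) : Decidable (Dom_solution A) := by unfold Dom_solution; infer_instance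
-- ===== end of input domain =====

-- B replaces A's full sort + adjacent-pair scan by a counting dictionary plus a
-- cumulative-parity scan over the sorted distinct values (alternative algorithm, same result).

-- ===== PORT A =====
-- the 'for i in range(0, len(A), 2)' loop with its early returns, as structural
-- recursion over the range list
def solLoopA (s : List Int) : List Int → Int
  | [] => PySem.List.pyGetD s (-1) 0
  | i :: rest =>
      if i + 1 = (s.length : Int) then PySem.List.pyGetD s (-1) 0
      else if PySem.List.pyGetD s i 0 ≠ PySem.List.pyGetD s (i + 1) 0 then PySem.List.pyGetD s i 0
      else solLoopA s rest

def solution (A : List Int) : Int :=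
  if A.length = 1 then PySem.List.pyGetD A 0 0
  else
    let s := PySem.List.sorted A (fun x => x)
    solLoopA s (PySem.List.pyRange 0 (s.length : Int) 2)

-- ===== PORT B =====
-- the 'for v in sorted(cnt)' loop with its early return
def solLoopB (cnt : PySem.Dict Int Int) : Int → List Int → Option Int
  | _, [] => none
  | acc, v :: rest =>
      let acc' := acc + cnt.getD v 0
      if acc' % 2 = 1 then some v else solLoopB cnt acc' rest

def solution_alt (A : List Int) : Int :=
  let cnt := A.foldl (fun d x => d.insert x (d.getD x 0 + 1)) PySem.Dict.empty
  match solLoopB cnt 0 (PySem.List.sorted cnt.keys (fun x => x)) with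
  | some v => v
  | none => (PySem.List.max? A (fun x => x)).getD 0

-- ===== PRECONDITION & SPEC =====
-- Pre_ excludes only the empty list: there Python A raises IndexError (A[-1]) and
-- Python B raises ValueError (max of empty sequence).
def Pre_solution (A : List Int) : Prop := A ≠ []
instance (A : List Int) : Decidable (Pre_solution A) := by unfold Pre_solution; infer_instance
def pvWitness_solution : List Int := [2, 3, 2]

def Spec_solution (A : List Int) (out : Int) : Prop := out = solution_alt A
instance (A : List Int) (out : Int) : Decidable (Spec_solution A out) := by unfold Spec_solution; infer_instance

-- ===== CLAIM (what is proved, stated in full; the proofs are below) =====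
def Claim_equal_solution : Prop := ∀ (A : List Int), Dom_solution A → Pre_solution A → Spec_solution A (solution A)

-- ===== LEMMAS AND PROOFS =====

-- common reference point of both proofs: scan of adjacent pairs of a list,
-- none = the list paired off completely
def pairScan? : List Int → Option Int
  | [] => none
  | [x] => some x
  | x :: y :: t => if x ≠ y then some x else pairScan? t

-- step-2 induction form of range(a, b, 2)
theorem pyRange_two_cons (a b : Int) (h : a < b) :
    PySem.List.pyRange a b 2 = a :: PySem.List.pyRange (a + 2) b 2 := by
  rw [PySem.List.pyRange_of_pos _ _ (by norm_num), PySem.List.pyRange_of_pos _ _ (by norm_num)]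
  have h1 : (if a < b then ((b - a + 2 - 1) / 2).toNat else 0)
      = (if a + 2 < b then ((b - (a + 2) + 2 - 1) / 2).toNat else 0) + 1 := by
    split_ifs <;> omega
  rw [h1, List.range_succ_eq_map, List.map_cons]
  simp only [Nat.cast_zero, mul_zero, add_zero, List.map_map]
  congr 1
  apply List.map_congr_left
  intro k _
  simp only [Function.comp_apply]
  push_cast
  ring

-- A's index loop over the sorted list computes pairScan? of the untraversed suffix
theorem solLoopA_eq (s : List Int) (k : Nat) :
    solLoopA s (PySem.List.pyRange (k : Int) (s.length : Int) 2) =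
      (match pairScan? (s.drop k) with
       | some v => v
       | none => PySem.List.pyGetD s (-1) 0) := by
  suffices H : ∀ m k, s.length - k ≤ m → solLoopA s (PySem.List.pyRange (k : Int) (s.length : Int) 2) =
      (match pairScan? (s.drop k) with
       | some v => v
       | none => PySem.List.pyGetD s (-1) 0) from H (s.length - k) k le_rfl
  intro m
  induction m with
  | zero =>
      intro k hk
      have hlen : s.length ≤ k := by omega
      have hr : PySem.List.pyRange (k : Int) (s.length : Int) 2 = [] := by
        rw [PySem.List.pyRange_of_pos _ _ (by norm_num)]
        have : ¬ ((k : Int) < (s.length : Int)) := by exact_mod_cast not_lt.mpr hlen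
        simp [this]
      rw [hr, List.drop_eq_nil_of_le hlen]
      rfl
  | succ m ih =>
      intro k hk
      by_cases hlt : k < s.length
      · have hltI : (k : Int) < (s.length : Int) := by exact_mod_cast hlt
        rw [pyRange_two_cons _ _ hltI]
        show (if (k : Int) + 1 = (s.length : Int) then PySem.List.pyGetD s (-1) 0
          else if PySem.List.pyGetD s (k : Int) 0 ≠ PySem.List.pyGetD s ((k : Int) + 1) 0
            then PySem.List.pyGetD s (k : Int) 0
          else solLoopA s (PySem.List.pyRange ((k : Int) + 2) (s.length : Int) 2)) = _
        have hdropk : s.drop k = s[k] :: s.drop (k + 1) := List.drop_eq_getElem_cons hlt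
        have hgk : PySem.List.pyGetD s (k : Int) 0 = s[k] := by
          rw [PySem.List.pyGetD_natCast]
          exact List.getD_eq_getElem s 0 hlt
        by_cases hlast : (k : Int) + 1 = (s.length : Int)
        · have hk1 : k + 1 = s.length := by exact_mod_cast hlast
          have hdrop1 : s.drop (k + 1) = [] := by
            rw [hk1]; exact List.drop_length
          rw [if_pos hlast, hdropk, hdrop1]
          have hne : s ≠ [] := by intro h; simp [h] at hlt
          rw [PySem.List.pyGetD_neg_one s 0 hne, List.getLast_eq_getElem]
          simp only [pairScan?]
          congr 1
          omega
        · rw [if_neg hlast]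
          have hlt1 : k + 1 < s.length := by omega
          have hdropk1 : s.drop (k + 1) = s[k+1] :: s.drop (k + 2) := List.drop_eq_getElem_cons hlt1
          have hgk1 : PySem.List.pyGetD s ((k : Int) + 1) 0 = s[k+1] := by
            have hc : (k : Int) + 1 = ((k + 1 : Nat) : Int) := by push_cast; ring
            rw [hc, PySem.List.pyGetD_natCast]
            exact List.getD_eq_getElem s 0 hlt1
          rw [hgk, hgk1, hdropk, hdropk1]
          by_cases heq : s[k] = s[k+1]
          · rw [if_neg (by simp [heq] : ¬ (s[k] ≠ s[k+1]))]
            have hc2 : (k : Int) + 2 = ((k + 2 : Nat) : Int) := by push_cast; ring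
            rw [hc2, ih (k + 2) (by omega)]
            simp [pairScan?, heq]
          · simp [pairScan?, heq]
      · have hr : PySem.List.pyRange (k : Int) (s.length : Int) 2 = [] := by
          rw [PySem.List.pyRange_of_pos _ _ (by norm_num)]
          have : ¬ ((k : Int) < (s.length : Int)) := by exact_mod_cast not_lt.mpr (by omega : s.length ≤ k)
          simp [this]
        rw [hr, List.drop_eq_nil_of_le (by omega)]
        rfl

-- a sorted list whose minimum is k splits into its block of k's and the rest
theorem sorted_split (s : List Int) (k : Int) (hs : s.Pairwise (· ≤ ·))
    (hmin : ∀ v ∈ s, k ≤ v) :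
    s = List.replicate (s.count k) k ++ s.filter (· ≠ k) := by
  induction s with
  | nil => simp
  | cons x t ih =>
      rcases List.pairwise_cons.mp hs with ⟨hxt, ht⟩
      by_cases hx : x = k
      · subst hx
        have htail := ih ht (fun v hv => hmin v (List.mem_cons_of_mem _ hv))
        simp only [List.count_cons_self, List.replicate_succ, List.filter_cons,
          decide_eq_true_eq]
        simp only [ne_eq, not_true_eq_false, List.cons_append]
        exact congrArg _ htail
      · have hk : ∀ v ∈ x :: t, k < v := by
          intro v hv
          rcases List.mem_cons.mp hv with rfl | hvt
          · exact lt_of_le_of_ne (hmin v (List.mem_cons_self)) (fun h => hx h.symm)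
          · exact lt_of_lt_of_le (lt_of_le_of_ne (hmin x List.mem_cons_self) (fun h => hx h.symm)) (hxt v hvt)
        have hcount : (x :: t).count k = 0 := by
          rw [List.count_eq_zero]
          intro hmem
          exact lt_irrefl k (hk k hmem)
        have hfilter : (x :: t).filter (· ≠ k) = x :: t := by
          rw [List.filter_eq_self]
          intro v hv
          simp [ne_of_gt (hk v hv)]
        rw [hcount, hfilter]
        simp

theorem pairScan_replicate (c : Nat) (k : Int) (t : List Int) (hc : 1 ≤ c)
    (ht : ∀ y ∈ t, k < y) :
    pairScan? (List.replicate c k ++ t) =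
      if c % 2 = 1 then some k else pairScan? t := by
  induction c using Nat.strong_induction_on with
  | _ c ih =>
    match c, hc with
    | 1, _ =>
        cases t with
        | nil => simp [pairScan?]
        | cons y t' =>
            have : k ≠ y := ne_of_lt (ht y List.mem_cons_self)
            simp [pairScan?, this]
    | (c' + 2), _ =>
        have hrep : List.replicate (c' + 2) k ++ t = k :: k :: (List.replicate c' k ++ t) := by
          simp [List.replicate_succ]
        rw [hrep,
          show pairScan? (k :: k :: (List.replicate c' k ++ t)) = pairScan? (List.replicate c' k ++ t)
            from by simp [pairScan?],
          show (c' + 2) % 2 = c' % 2 by omega]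
        by_cases hc' : 1 ≤ c'
        · exact ih c' (by omega) hc'
        · have hz : c' = 0 := by omega
          subst hz
          simp

-- B's parity scan over the sorted distinct values computes pairScan? of the sorted list
theorem solLoopB_eq (cnt : PySem.Dict Int Int) (K : List Int) : ∀ (s : List Int) (acc : Int),
    acc % 2 = 0 → K.Pairwise (· < ·) → s.Pairwise (· ≤ ·) →
    (∀ v, v ∈ s ↔ v ∈ K) → (∀ v ∈ K, cnt.getD v 0 = (s.count v : Int)) →
    solLoopB cnt acc K = pairScan? s := by
  induction K with
  | nil =>
      intro s acc _ _ _ hmem _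
      have : s = [] := List.eq_nil_iff_forall_not_mem.mpr (fun a ha => by simpa using (hmem a).mp ha)
      subst this
      rfl
  | cons k K' ih =>
      intro s acc hacc hK hs hmem hcnt
      have hKlt : ∀ v ∈ K', k < v := fun v hv => List.rel_of_pairwise_cons hK hv
      have hks : k ∈ s := (hmem k).mpr List.mem_cons_self
      have hc1 : 1 ≤ s.count k := List.count_pos_iff.mpr hks
      have hmin : ∀ v ∈ s, k ≤ v := by
        intro v hv
        rcases List.mem_cons.mp ((hmem v).mp hv) with rfl | hv'
        · exact le_refl v
        · exact le_of_lt (hKlt v hv')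
      have hsplit := sorted_split s k hs hmin
      have ht2 : ∀ y ∈ s.filter (· ≠ k), k < y := by
        intro y hy
        rcases List.mem_filter.mp hy with ⟨hys, hyk⟩
        have : y ≠ k := by simpa using hyk
        exact lt_of_le_of_ne (hmin y hys) this.symm
      have hps : pairScan? s = if s.count k % 2 = 1 then some k else pairScan? (s.filter (· ≠ k)) := by
        conv_lhs => rw [hsplit]
        exact pairScan_replicate _ k _ hc1 ht2
      have hgd : cnt.getD k 0 = (s.count k : Int) := hcnt k List.mem_cons_self
      show (if (acc + cnt.getD k 0) % 2 = 1 then some k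
            else solLoopB cnt (acc + cnt.getD k 0) K') = pairScan? s
      rw [hgd, hps]
      by_cases hodd : s.count k % 2 = 1
      · rw [if_pos hodd, if_pos (by omega)]
      · rw [if_neg hodd, if_neg (by omega)]
        apply ih
        · omega
        · exact List.pairwise_cons.mp hK |>.2
        · exact hs.filter _
        · intro v
          constructor
          · intro hv
            rcases List.mem_filter.mp hv with ⟨hvs, hvk⟩
            rcases List.mem_cons.mp ((hmem v).mp hvs) with rfl | hv'
            · simp at hvk
            · exact hv'
          · intro hv
            exact List.mem_filter.mpr ⟨(hmem v).mpr (List.mem_cons_of_mem _ hv),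
              by simpa using ne_of_gt (hKlt v hv)⟩
        · intro v hv
          rw [hcnt v (List.mem_cons_of_mem _ hv)]
          congr 1
          rw [List.count_filter]
          simp [ne_of_gt (hKlt v hv)]

-- the maximum is the last element of the sorted list
theorem max_eq_last (A : List Int) (h : A ≠ []) :
    (PySem.List.max? A (fun x => x)).getD 0 =
      PySem.List.pyGetD (PySem.List.sorted A (fun x => x)) (-1) 0 := by
  have hsne : PySem.List.sorted A (fun x => x) ≠ [] := by
    simpa [PySem.List.sorted_eq_nil_iff] using h
  rw [PySem.List.pyGetD_neg_one _ 0 hsne]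
  cases hm : PySem.List.max? A (fun x => x) with
  | none => exact absurd ((PySem.List.max?_eq_none_iff A (fun x => x)).mp hm) h
  | some m =>
      simp only [Option.getD_some]
      have hmA : m ∈ A := PySem.List.max?_mem hm
      have hmax : ∀ y ∈ A, y ≤ m := fun y hy => PySem.List.max?_isMax hm y hy
      have hlastmem : (PySem.List.sorted A (fun x => x)).getLast hsne ∈ A := by
        rw [← PySem.List.mem_sorted A (fun x => x) false]
        exact List.getLast_mem hsne
      have h1 : (PySem.List.sorted A (fun x => x)).getLast hsne ≤ m := hmax _ hlastmem
      have hms : m ∈ PySem.List.sorted A (fun x => x) :=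
        (PySem.List.mem_sorted A (fun x => x) false m).mpr hmA
      obtain ⟨p, hp, hpe⟩ := List.getElem_of_mem hms
      have h2 : m ≤ (PySem.List.sorted A (fun x => x)).getLast hsne := by
        rw [List.getLast_eq_getElem hsne, ← hpe]
        exact PySem.List.sorted_id_getElem_mono A (by omega) (by omega)
      exact le_antisymm h2 h1

-- both ports equal the pairScan? of the sorted list (with max = last for the none case)
theorem solution_alt_eq_pairScan (A : List Int) (h : A ≠ []) :
    solution_alt A =
      (match pairScan? (PySem.List.sorted A (fun x => x)) with
       | some v => v
       | none => PySem.List.pyGetD (PySem.List.sorted A (fun x => x)) (-1) 0) := by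
  unfold solution_alt
  show (match solLoopB (PySem.Dict.counter A) 0
          (PySem.List.sorted (PySem.Dict.counter A).keys (fun x => x)) with
        | some v => v
        | none => (PySem.List.max? A (fun x => x)).getD 0) = _
  rw [PySem.Dict.keys_counter]
  have hB : solLoopB (PySem.Dict.counter A) 0
      (PySem.List.sorted (PySem.Set.ofList A) (fun x => x)) =
      pairScan? (PySem.List.sorted A (fun x => x)) := by
    apply solLoopB_eq
    · norm_num
    · exact PySem.List.sorted_ofList_pairwise_lt A
    · exact PySem.List.sorted_pairwise A (fun x => x)
    · intro v
      rw [PySem.List.mem_sorted, PySem.List.mem_sorted, PySem.Set.mem_ofList]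
    · intro v _
      rw [PySem.Dict.getD_counter]
      congr 1
      exact ((PySem.List.sorted_perm A (fun x => x) false).count_eq v).symm
  rw [hB]
  cases hps : pairScan? (PySem.List.sorted A (fun x => x)) with
  | some v => rfl
  | none => exact max_eq_last A h

-- ===== VERDICT (by name: the statement is the Claim_ definition above) =====
theorem solution_spec : Claim_equal_solution := by
  unfold Claim_equal_solution Spec_solution
  intro A _ hpre
  have hApre : A ≠ [] := hpre
  rw [solution_alt_eq_pairScan A hApre]
  show (if A.length = 1 then PySem.List.pyGetD A 0 0
        else solLoopA (PySem.List.sorted A (fun x => x))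
          (PySem.List.pyRange 0 ((PySem.List.sorted A (fun x => x)).length : Int) 2)) = _
  by_cases h1 : A.length = 1
  · rw [if_pos h1]
    match A, h1 with
    | [a], _ =>
        have hs : PySem.List.sorted [a] (fun x => x) = [a] :=
          PySem.List.sorted_eq_self_of_pairwise [a] (fun x => x) (List.pairwise_singleton _ _)
        rw [hs]
        rfl
  · rw [if_neg h1]
    have h0 : ((0 : Nat) : Int) = (0 : Int) := rfl
    rw [← h0, solLoopA_eq (PySem.List.sorted A (fun x => x)) 0, List.drop_zero]
    rfl
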